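-- pv_equiv track=rewrite | github.com/zgotter/algorithm-python | programmers/카카오/level2/n진수게임_01_ok.py | solution
-- ===== SOURCE A (Python) =====
-- def convert(num, base):
--     special = {i+10: chr(i+65) for i in range(6)} # 10:A, 11:B, ...
--     res = []
--     while num > 0:
--         num, r = divmod(num, base)
--         res.append(str(r) if r not in special else special[r])
--     return ''.join(reversed(res))
--
-- def solution(n, t, m, p):
--     num_list = []
--     for num in range(t*m):
--         converted_num = convert(num, n) if num else num
--         num_list.extend(list(str(converted_num)))
--     target_idx = [m*i+p-1 for i in range(t)] # 등차수열
--     answer = "".join([num for idx, num in enumerate(num_list) if idx in target_idx])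
--     return answer
-- ===== SOURCE B (Python) =====
-- def _digits(num, base):
--     # most-significant-first digits of num in the given base; '' for num <= 0
--     if num <= 0:
--         return ''
--     q, r = divmod(num, base)
--     return _digits(q, base) + (chr(55 + r) if 10 <= r < 16 else str(r))
--
-- def solution(n, t, m, p):
--     out = []
--     idx = 0
--     for num in range(t * m):
--         for ch in (_digits(num, n) or '0'):
--             d = idx - (p - 1)
--             if d % m == 0 and 0 <= d // m < t:
--                 out.append(ch)
--             idx += 1
--     return ''.join(out)
-- ===== Notes on version B (the rewrite author's own statement) =====
-- stated objective: faster
-- what changed: B streams the digits with a running position counter and picks player p's characters by an O(1) modular-arithmetic test, instead of materialising the whole num_list plus an explicit target_idx list and testing 'idx in target_idx' by a linear scan per character.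
import Mathlib
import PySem

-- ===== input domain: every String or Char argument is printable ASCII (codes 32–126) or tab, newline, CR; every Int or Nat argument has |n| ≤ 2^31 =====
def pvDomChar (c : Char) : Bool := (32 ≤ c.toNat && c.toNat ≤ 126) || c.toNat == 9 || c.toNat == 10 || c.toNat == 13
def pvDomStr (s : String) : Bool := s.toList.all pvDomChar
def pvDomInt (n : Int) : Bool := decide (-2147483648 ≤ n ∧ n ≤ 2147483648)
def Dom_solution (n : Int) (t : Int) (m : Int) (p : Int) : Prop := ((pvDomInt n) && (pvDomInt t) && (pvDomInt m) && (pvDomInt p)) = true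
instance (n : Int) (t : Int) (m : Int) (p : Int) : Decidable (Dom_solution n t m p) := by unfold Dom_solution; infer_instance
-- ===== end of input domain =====

-- B streams the digits with a running position counter and selects player p's characters by a
-- modular-arithmetic test, instead of building the full num_list and scanning a target_idx list.

-- ===== PORT A =====
-- str(r) if r not in special else special[r]  (special maps 10..15 to 'A'..'F')
def convertDigit (r : Int) : List Char :=
  if 10 ≤ r ∧ r ≤ 15 then [Char.ofNat (55 + r.toNat)] else (PySem.Int.toStr r).toList

-- the while-loop of convert, digits appended least-significant first; fuel makes it total
-- (on Pre_ the fuel num.toNat + 1 always suffices: the quotient strictly decreases for base ≥ 2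
-- and becomes nonpositive at once for base ≤ -1)
def convertLoop : Nat → Int → Int → List (List Char)
  | 0, _, _ => []
  | fuel + 1, num, base =>
    if 0 < num then
      convertDigit (PySem.Int.mod num base) :: convertLoop fuel (PySem.Int.floordiv num base) base
    else []

-- ''.join(reversed(res))
def convertA (num base : Int) : List Char := ((convertLoop (num.toNat + 1) num base).reverse).flatten

def solution (n : Int) (t : Int) (m : Int) (p : Int) : String :=
  let numList : List Char :=
    (PySem.List.pyRange 0 (t * m) 1).foldl
      (fun acc num => acc ++ (if num ≠ 0 then convertA num n else (PySem.Int.toStr num).toList)) []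
  let targetIdx : List Int := (PySem.List.pyRange 0 t 1).map (fun i => m * i + p - 1)
  String.ofList (((PySem.List.enumerate numList 0).filter (fun q => targetIdx.contains q.1)).map (·.2))

-- ===== PORT B =====
-- recursive most-significant-first digits; '' (i.e. []) for num ≤ 0; fuel as above
def digitsB : Nat → Int → Int → List Char
  | 0, _, _ => []
  | fuel + 1, num, base =>
    if num ≤ 0 then []
    else
      digitsB fuel (PySem.Int.floordiv num base) base ++
        (if 10 ≤ PySem.Int.mod num base ∧ PySem.Int.mod num base < 16
         then [Char.ofNat (55 + (PySem.Int.mod num base).toNat)]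
         else (PySem.Int.toStr (PySem.Int.mod num base)).toList)

-- the selection test: d % m == 0 and 0 <= d // m < t
def selB (t m d : Int) : Bool :=
  PySem.Int.mod d m == 0 && decide (0 ≤ PySem.Int.floordiv d m) && decide (PySem.Int.floordiv d m < t)

def solution_alt (n : Int) (t : Int) (m : Int) (p : Int) : String :=
  String.ofList
    ((PySem.List.pyRange 0 (t * m) 1).foldl
      (fun st num =>
        (let ds := digitsB (num.toNat + 1) num n
         if ds = [] then ['0'] else ds).foldl
          (fun st2 ch =>
            (if selB t m (st2.2 - (p - 1)) then st2.1 ++ [ch] else st2.1, st2.2 + 1)) st)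
      ([], 0)).1

-- ===== PRECONDITION & SPEC =====
-- Pre_ excludes only the inputs where A does not return: with base n = 0 convert raises
-- ZeroDivisionError and with n = 1 its while-loop never terminates, both reachable iff t*m ≥ 2.
def Pre_solution (n : Int) (t : Int) (m : Int) (p : Int) : Prop :=
  (2 ≤ n ∨ n ≤ -1) ∨ t * m ≤ 1
instance (n : Int) (t : Int) (m : Int) (p : Int) : Decidable (Pre_solution n t m p) := by
  unfold Pre_solution; infer_instance

def pvWitness_solution : Int × Int × Int × Int := (2, 4, 2, 1)

def Spec_solution (n : Int) (t : Int) (m : Int) (p : Int) (out : String) : Prop := out = solution_alt n t m p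
instance (n : Int) (t : Int) (m : Int) (p : Int) (out : String) : Decidable (Spec_solution n t m p out) := by unfold Spec_solution; infer_instance

-- ===== CLAIM (what is proved, stated in full; the proofs are below) =====
def Claim_equal_solution : Prop := ∀ (n : Int) (t : Int) (m : Int) (p : Int), Dom_solution n t m p → Pre_solution n t m p → Spec_solution n t m p (solution n t m p)

-- ===== LEMMAS AND PROOFS =====

-- the two digit renderings agree (same fuel on both sides)
theorem digitsB_eq_convert (fuel : Nat) (num base : Int) :
    digitsB fuel num base = ((convertLoop fuel num base).reverse).flatten := by
  induction fuel generalizing num with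
  | zero => simp [digitsB, convertLoop]
  | succ f ih =>
    by_cases h : 0 < num
    · simp only [digitsB, convertLoop, if_pos h, if_neg (by omega : ¬ num ≤ 0),
        List.reverse_cons, List.flatten_append, ih]
      congr 1
      simp only [List.flatten_cons, List.flatten_nil, List.append_nil, convertDigit]
      split_ifs with h1 h2 h2 <;> simp_all <;> omega
    · simp [digitsB, convertLoop, if_neg h, if_pos (by omega : num ≤ 0)]

theorem toDigitsCore_ne_nil (b : Nat) : ∀ (f n : Nat) (ds : List Char), ds ≠ [] ∨ 0 < f →
    Nat.toDigitsCore b f n ds ≠ [] := by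
  intro f
  induction f with
  | zero =>
    intro n ds h
    rcases h with h | h
    · simpa [Nat.toDigitsCore] using h
    · omega
  | succ f ih =>
    intro n ds _
    rw [Nat.toDigitsCore]
    split
    · simp
    · exact ih _ _ (Or.inl (by simp))

theorem toStr_ne_nil (r : Int) : (PySem.Int.toStr r).toList ≠ [] := by
  simp only [PySem.Int.toList_toStr, PySem.Int.toChars, Nat.toDigits]
  split_ifs
  · simp
  · exact toDigitsCore_ne_nil 10 _ _ _ (Or.inr (by omega))

theorem convertDigit_ne_nil (r : Int) : convertDigit r ≠ [] := by
  unfold convertDigit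
  split_ifs
  · simp
  · exact toStr_ne_nil r

theorem convertA_ne_nil (num base : Int) (h : 0 < num) : convertA num base ≠ [] := by
  unfold convertA
  simp only [convertLoop, if_pos h, List.reverse_cons, List.flatten_append, List.flatten_cons,
    List.flatten_nil, List.append_nil]
  intro he
  exact convertDigit_ne_nil _ (List.append_eq_nil_iff.mp he).2

-- the per-number emitted character lists agree
theorem emit_eq (base : Int) (num : Int) (h : 0 ≤ num) :
    (let ds := digitsB (num.toNat + 1) num base
     if ds = [] then ['0'] else ds) =
    (if num ≠ 0 then convertA num base else (PySem.Int.toStr num).toList) := by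
  by_cases h0 : num = 0
  · subst h0
    have h1 : (PySem.Int.toStr 0).toList = ['0'] := by
      rw [PySem.Int.toList_toStr]; decide
    simp [digitsB, h1]
  · have hpos : 0 < num := by omega
    simp only [digitsB_eq_convert]
    rw [if_neg (by simpa [convertA] using convertA_ne_nil num base hpos), if_pos h0]
    rfl

-- selection: membership in the arithmetic progression ↔ the modular test (m ≠ 0)
theorem sel_iff (t m p idx : Int) (hm : m ≠ 0) :
    ((PySem.List.pyRange 0 t 1).map (fun i => m * i + p - 1)).contains idx =
    selB t m (idx - (p - 1)) := by
  rw [Bool.eq_iff_iff]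
  simp only [List.contains_iff_mem, List.mem_map, PySem.List.mem_pyRange_one, selB,
    Bool.and_eq_true, beq_iff_eq, decide_eq_true_eq]
  have hq := PySem.Int.floordiv_mul_add_mod (idx - (p - 1)) m
  constructor
  · rintro ⟨i, ⟨hi0, hit⟩, rfl⟩
    have hd : m * i + p - 1 - (p - 1) = i * m := by ring
    rw [hd] at hq ⊢
    have hmod : PySem.Int.mod (i * m) m = 0 :=
      (PySem.Int.mod_eq_zero_iff_dvd (i * m) m).mpr ⟨i, by ring⟩
    rw [hmod] at hq
    have hfd : PySem.Int.floordiv (i * m) m = i :=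
      mul_right_cancel₀ hm (by omega)
    exact ⟨⟨hmod, by omega⟩, by omega⟩
  · rintro ⟨⟨hmod, hge⟩, hlt⟩
    rw [hmod] at hq
    refine ⟨PySem.Int.floordiv (idx - (p - 1)) m, ⟨hge, hlt⟩, ?_⟩
    have := mul_comm (PySem.Int.floordiv (idx - (p - 1)) m) m
    omega

-- the inner character fold = filter over the enumeration
theorem inner_fold (t m p : Int) (xs : List Char) (acc : List Char) (s : Int) :
    xs.foldl (fun st2 ch => (if selB t m (st2.2 - (p - 1)) then st2.1 ++ [ch] else st2.1, st2.2 + 1))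
      (acc, s) =
    (acc ++ ((PySem.List.enumerate xs s).filter (fun q => selB t m (q.1 - (p - 1)))).map (·.2),
     s + xs.length) := by
  induction xs generalizing acc s with
  | nil => simp [PySem.List.enumerate_nil]
  | cons x xs ih =>
    rw [List.foldl_cons, ih, PySem.List.enumerate_cons, Prod.mk.injEq]
    refine ⟨?_, ?_⟩
    · by_cases hs : selB t m (s - (p - 1)) <;> simp [hs]
    · rw [List.length_cons]; push_cast; omega

-- the outer fold over the numbers = filter over the enumeration of the concatenation
theorem outer_fold (n t m p : Int) (L : List Int) (acc : List Char) (s : Int) :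
    L.foldl (fun st num =>
        (let ds := digitsB (num.toNat + 1) num n
         if ds = [] then ['0'] else ds).foldl
          (fun st2 ch => (if selB t m (st2.2 - (p - 1)) then st2.1 ++ [ch] else st2.1, st2.2 + 1)) st)
      (acc, s) =
    (acc ++ ((PySem.List.enumerate
        (L.flatMap (fun num => let ds := digitsB (num.toNat + 1) num n
                               if ds = [] then ['0'] else ds)) s).filter
        (fun q => selB t m (q.1 - (p - 1)))).map (·.2),
     s + (L.flatMap (fun num => let ds := digitsB (num.toNat + 1) num n
                                if ds = [] then ['0'] else ds)).length) := by
  induction L generalizing acc s with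
  | nil => simp [PySem.List.enumerate_nil]
  | cons a L ih =>
    rw [List.foldl_cons, inner_fold, ih]
    simp only [List.flatMap_cons, PySem.List.enumerate_append, List.filter_append,
      List.map_append, List.append_assoc, List.length_append, Prod.mk.injEq]
    refine ⟨trivial, ?_⟩
    push_cast
    omega

-- ===== VERDICT (by name: the statement is the Claim_ definition above) =====
theorem solution_spec : Claim_equal_solution := by
  intro n t m p _ _
  unfold Spec_solution solution solution_alt
  by_cases hm : m = 0
  · subst hm
    rw [mul_zero, PySem.List.pyRange_one_eq_nil le_rfl]
    simp [PySem.List.enumerate_nil]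
  · rw [PySem.List.foldl_append_eq_flatMap, outer_fold]
    simp only [List.nil_append]
    have hflat :
        (PySem.List.pyRange 0 (t * m) 1).flatMap
            (fun num => let ds := digitsB (num.toNat + 1) num n
                        if ds = [] then ['0'] else ds) =
        (PySem.List.pyRange 0 (t * m) 1).flatMap
            (fun num => if num ≠ 0 then convertA num n else (PySem.Int.toStr num).toList) := by
      simp only [List.flatMap_def]
      refine congrArg List.flatten (List.map_congr_left ?_)
      intro num hnum
      exact emit_eq n num ((PySem.List.mem_pyRange_one.mp hnum).1)
    rw [hflat]
    congr 1
    refine congrArg (List.map _) (List.filter_congr ?_)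
    intro q _
    exact sel_iff t m p q.1 hm
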